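-- pv_equiv track=rewrite | github.com/siddhanth718/.code | 8a.py | Highest_marks
-- ===== SOURCE A (Python) =====
-- def Highest_marks(marks,names):
--     if(len(marks)!=len(names)):
--         return ("Mismatch in records ....Get out")
--
--     res=[]
--     max_mark = max(marks)
--     for i in range(len(names)):
--         if marks[i]==max_mark:
--             res.append(tuple((names[i],marks[i])))
--
--     return res
-- ===== SOURCE B (Python) =====
-- def Highest_marks(marks, names):
--     if (len(marks) != len(names)):
--         return ("Mismatch in records ....Get out")
--     best = None
--     res = []
--     for name, mark in zip(names, marks):
--         if best is None or mark > best: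
--             best = mark
--             res = [(name, mark)]
--         elif mark == best:
--             res.append((name, mark))
--     return res
-- ===== Notes on version B (the rewrite author's own statement) =====
-- stated objective: alternative
-- what changed: Replaced the two-pass max-then-filter (max(marks), then an index loop re-reading marks[i]/names[i]) by a single fold over zip(names, marks) maintaining the running best mark and resetting/extending the result list.
-- outside the precondition, e.g. on Highest_marks([], []): A raises ValueError, B returns []
import Mathlib
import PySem

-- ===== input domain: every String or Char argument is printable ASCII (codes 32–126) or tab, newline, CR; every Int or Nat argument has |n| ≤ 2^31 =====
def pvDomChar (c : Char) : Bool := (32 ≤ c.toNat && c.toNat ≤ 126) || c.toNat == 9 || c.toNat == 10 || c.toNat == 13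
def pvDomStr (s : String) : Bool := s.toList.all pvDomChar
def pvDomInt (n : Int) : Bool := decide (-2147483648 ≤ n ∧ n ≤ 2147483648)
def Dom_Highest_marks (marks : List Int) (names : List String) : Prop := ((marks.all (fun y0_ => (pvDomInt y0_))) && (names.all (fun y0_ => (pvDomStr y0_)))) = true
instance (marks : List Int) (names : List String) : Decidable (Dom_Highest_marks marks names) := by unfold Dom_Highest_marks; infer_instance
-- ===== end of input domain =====

-- B is a single fold over zip(names, marks) keeping the running best mark, instead of A's
-- max-then-filter index loop; equivalence is about the RETURN value on well-formed inputs.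

-- ===== PORT A =====
-- Python A: guard on length mismatch (returns a string — outside the return type, excluded by Pre_);
-- max(marks) (ValueError on [] — excluded by Pre_); then an index loop filtering marks[i] == max.
def Highest_marks (marks : List Int) (names : List String) : List (String × Int) :=
  if marks.length ≠ names.length then []  -- Python returns a string here; outside Pre_
  else
    match PySem.List.max? marks (fun y => y) with
    | none => []  -- max([]) raises ValueError; outside Pre_
    | some maxMark =>
      (PySem.List.pyRange 0 (names.length : Int) 1).foldl
        (fun res i =>
          if PySem.List.pyGetD marks i 0 = maxMark then
            res ++ [(PySem.List.pyGetD names i "", PySem.List.pyGetD marks i 0)]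
          else res) []

-- ===== PORT B =====
-- one step of B's loop body over (best, res)
def pvBStep (st : Option Int × List (String × Int)) (p : String × Int) :
    Option Int × List (String × Int) :=
  match st.1 with
  | none => (some p.2, [p])
  | some b => if b < p.2 then (some p.2, [p])
              else if p.2 = b then (st.1, st.2 ++ [p])
              else st

def Highest_marks_alt (marks : List Int) (names : List String) : List (String × Int) :=
  if marks.length ≠ names.length then []  -- same mismatch guard as A (Python returns the same string)
  else ((names.zip marks).foldl pvBStep (none, [])).2

-- ===== PRECONDITION & SPEC =====
-- Pre_ excludes length mismatch (A returns a string, not a list of pairs) and empty marks (max([]) raises ValueError).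
def Pre_Highest_marks (marks : List Int) (names : List String) : Prop :=
  marks ≠ [] ∧ marks.length = names.length
instance (marks : List Int) (names : List String) : Decidable (Pre_Highest_marks marks names) := by
  unfold Pre_Highest_marks; infer_instance

def pvWitness_Highest_marks : List Int × List String := ([3, 5, 5], ["a", "b", "c"])

def Spec_Highest_marks (marks : List Int) (names : List String) (out : List (String × Int)) : Prop :=
  out = Highest_marks_alt marks names
instance (marks : List Int) (names : List String) (out : List (String × Int)) : Decidable (Spec_Highest_marks marks names out) := by
  unfold Spec_Highest_marks; infer_instance

-- ===== CLAIM (what is proved, stated in full; the proofs are below) =====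
def Claim_equal_Highest_marks : Prop :=
  ∀ (marks : List Int) (names : List String), Dom_Highest_marks marks names →
    Pre_Highest_marks marks names →
    Spec_Highest_marks marks names (Highest_marks marks names)

-- ===== LEMMAS AND PROOFS =====

-- A's index loop, read through the zip list (indices are in range for both lists).
lemma a_loop_eq_zip_filter (names : List String) (marks : List Int)
    (h : marks.length = names.length) (m : Int) :
    (PySem.List.pyRange 0 (names.length : Int) 1).foldl
        (fun res i =>
          if PySem.List.pyGetD marks i 0 = m then
            res ++ [(PySem.List.pyGetD names i "", PySem.List.pyGetD marks i 0)]
          else res) []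
      = (names.zip marks).filter (fun p => p.2 = m) := by
  have hlen : (names.zip marks).length = names.length := by
    simp [List.length_zip, h]
  have hcongr : (PySem.List.pyRange 0 (names.length : Int) 1).foldl
        (fun res i =>
          if PySem.List.pyGetD marks i 0 = m then
            res ++ [(PySem.List.pyGetD names i "", PySem.List.pyGetD marks i 0)]
          else res) []
      = (PySem.List.pyRange 0 (names.length : Int) 1).foldl
        (fun res i =>
          (fun acc (x : String × Int) => if x.2 = m then acc ++ [x] else acc) res
            (PySem.List.pyGetD (names.zip marks) i ("", 0))) [] := by
    apply PySem.List.foldl_congr_mem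
    intro acc i hi
    have hib := PySem.List.mem_pyRange_one.mp hi
    have h0 : 0 ≤ i := hib.1
    have h1 : i < (names.length : Int) := hib.2
    have hgm : PySem.List.pyGetD marks i 0 = marks[i.toNat]'(by omega) :=
      PySem.List.pyGetD_eq_getElem marks 0 h0 (by omega)
    have hgn : PySem.List.pyGetD names i "" = names[i.toNat]'(by omega) :=
      PySem.List.pyGetD_eq_getElem names "" h0 (by omega)
    have hgz : PySem.List.pyGetD (names.zip marks) i ("", 0)
        = (names.zip marks)[i.toNat]'(by omega) :=
      PySem.List.pyGetD_eq_getElem (names.zip marks) ("", 0) h0 (by omega)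
    rw [hgm, hgn, hgz, List.getElem_zip]
  rw [hcongr]
  have hrange : (PySem.List.pyRange 0 (names.length : Int) 1)
      = PySem.List.pyRange 0 (PySem.List.len (names.zip marks)) 1 := by
    simp [hlen]
  rw [hrange,
    PySem.List.foldl_pyRange_zero_pyGetD (names.zip marks) ("", 0)
      (fun acc x => if x.2 = m then acc ++ [x] else acc) []]
  simpa using PySem.List.foldl_append_if (fun p : String × Int => decide (p.2 = m)) id
      (names.zip marks) []

-- B's fold from a started state: running max, filter by it; acc is kept iff b stays the max.
lemma bfold_inv (l : List (String × Int)) (b : Int) (acc : List (String × Int)) :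
    l.foldl pvBStep (some b, acc)
      = (some (l.foldl (fun x p => max x p.2) b),
         (if b = l.foldl (fun x p => max x p.2) b then acc else [])
           ++ l.filter (fun p => p.2 = l.foldl (fun x p => max x p.2) b)) := by
  induction l generalizing b acc with
  | nil => simp
  | cons p t ih =>
    have hble : ∀ (x : Int) (u : List (String × Int)), x ≤ u.foldl (fun x p => max x p.2) x := by
      intro x u
      induction u generalizing x with
      | nil => simp
      | cons q u ihu => exact le_trans (le_max_left _ _) (ihu _)
    simp only [List.foldl_cons]
    rcases lt_trichotomy p.2 b with hlt | heq | hgt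
    · have h1 : pvBStep (some b, acc) p = (some b, acc) := by
        simp [pvBStep, not_lt.mpr (le_of_lt hlt), ne_of_lt hlt]
      have h2 : max b p.2 = b := max_eq_left (le_of_lt hlt)
      rw [h1, ih]; simp only [h2]
      have hne : ¬ (p.2 = t.foldl (fun x p => max x p.2) b) := by
        intro hc
        have := hble b t
        omega
      simp [hne]
    · have h1 : pvBStep (some b, acc) p = (some b, acc ++ [p]) := by
        simp [pvBStep, heq]
      have h2 : max b p.2 = b := by omega
      rw [h1, ih]; simp only [h2]
      by_cases hb : b = t.foldl (fun x p => max x p.2) b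
      · have hp : p.2 = t.foldl (fun x p => max x p.2) b := heq.trans hb
        simp only [if_pos hb, List.filter_cons, hp, decide_true, List.append_assoc,
          List.singleton_append, if_true]
      · have hne : ¬ (p.2 = t.foldl (fun x p => max x p.2) b) := by rw [heq]; exact hb
        simp [hb, hne]
    · have h1 : pvBStep (some b, acc) p = (some p.2, [p]) := by
        simp [pvBStep, hgt]
      have h2 : max b p.2 = p.2 := max_eq_right (le_of_lt hgt)
      rw [h1, ih]; simp only [h2]
      have hbne : ¬ (b = t.foldl (fun x p => max x p.2) p.2) := by
        have := hble p.2 t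
        intro hc; omega
      simp only [List.filter_cons, if_neg hbne, List.nil_append]
      by_cases hp : p.2 = t.foldl (fun x p => max x p.2) p.2
      · rw [if_pos (decide_eq_true hp), if_pos hp, List.singleton_append]
      · rw [if_neg (fun hc => hp (of_decide_eq_true hc)), if_neg hp, List.nil_append]

-- ===== VERDICT (by name: the statement is the Claim_ definition above) =====
theorem Highest_marks_spec : Claim_equal_Highest_marks := by
  intro marks names _ hpre
  obtain ⟨hne, hlen⟩ := hpre
  unfold Spec_Highest_marks Highest_marks Highest_marks_alt
  have hguard : ¬ (marks.length ≠ names.length) := fun hc => hc hlen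
  rw [if_neg hguard, if_neg hguard]
  cases marks with
  | nil => exact absurd rfl hne
  | cons mk marks' =>
    cases names with
    | nil => simp at hlen
    | cons nm names' =>
      have hlen' : marks'.length = names'.length := by
        simpa using hlen
      rw [PySem.List.max?_id_cons]
      simp only [List.zip_cons_cons, List.foldl_cons]
      have hstep : pvBStep (none, []) (nm, mk) = (some mk, [(nm, mk)]) := rfl
      rw [hstep, bfold_inv,
        a_loop_eq_zip_filter (nm :: names') (mk :: marks') (by simpa using hlen')]
      have hmap : (names'.zip marks').map Prod.snd = marks' :=
        List.map_snd_zip (by omega)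
      have hF : (names'.zip marks').foldl (fun x p => max x p.2) mk
          = marks'.foldl max mk := by
        calc (names'.zip marks').foldl (fun x p => max x p.2) mk
            = ((names'.zip marks').map Prod.snd).foldl max mk := List.foldl_map.symm
          _ = marks'.foldl max mk := by rw [hmap]
      rw [hF]
      simp only [List.zip_cons_cons, List.filter_cons]
      by_cases hmk : mk = marks'.foldl max mk
      · rw [if_pos (by simpa using hmk), if_pos hmk, List.singleton_append]
      · rw [if_neg (by simpa using hmk), if_neg hmk, List.nil_append]
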